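-- pv_equiv track=rewrite | github.com/Tarun-asati21/DSA-python-journey | 1475-final-prices-with-a-special-discount-in-a-shop/1475-final-prices-with-a-special-discount-in-a-shop.py | finalPrices
-- ===== SOURCE A (Python) =====
-- from typing import List
--
-- def finalPrices(prices: List[int]) -> List[int]:
--     arr = []
--     for i in range(len(prices)) :
--         temp=1
--         for j in range (i+1, len(prices)) :
--             if prices[j] <= prices[i] :
--                 buy_price = prices[i]
--                 discount = prices[j]
--                 arr.append(buy_price-discount)
--                 temp=0
--                 break
--         if temp == 1  :
--             arr.append(prices[i])
--     return arr
-- ===== SOURCE B (Python) =====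
-- def finalPrices(prices):
--     # One right-to-left pass with a monotonic stack of candidate discounts.
--     res = []
--     stack = []
--     for p in reversed(prices):
--         while stack and stack[-1] > p:
--             stack.pop()
--         res.append(p - (stack[-1] if stack else 0))
--         stack.append(p)
--     res.reverse()
--     return res
-- ===== Notes on version B (the rewrite author's own statement) =====
-- stated objective: faster
-- what changed: Replaced the quadratic per-index forward scan for the next smaller-or-equal price by a single right-to-left pass maintaining a monotonic stack of candidate discounts.
import Mathlib
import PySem

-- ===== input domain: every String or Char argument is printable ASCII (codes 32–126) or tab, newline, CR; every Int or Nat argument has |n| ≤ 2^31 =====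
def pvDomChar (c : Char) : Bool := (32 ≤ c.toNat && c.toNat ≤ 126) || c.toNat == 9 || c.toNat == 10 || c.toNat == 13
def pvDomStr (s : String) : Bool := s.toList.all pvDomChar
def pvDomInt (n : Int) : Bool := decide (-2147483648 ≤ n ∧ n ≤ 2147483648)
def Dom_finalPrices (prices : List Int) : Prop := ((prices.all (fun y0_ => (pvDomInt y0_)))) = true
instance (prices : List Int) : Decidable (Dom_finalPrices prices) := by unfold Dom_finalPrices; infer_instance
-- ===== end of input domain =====

-- B replaces A's quadratic per-index forward scan by one right-to-left pass with a
-- monotonic stack (objective: faster, asymptotic O(n^2) -> O(n)).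

-- ===== PORT A =====
-- inner 'for j in range(i+1, len(prices))' with break/temp: returns the appended
-- discounted value (temp=0 case) or none (temp stayed 1)
def loopJA (prices : List Int) (pi : Int) : List Int → Option Int
  | [] => none
  | j :: rest =>
    let pj := PySem.List.pyGetD prices j 0
    if pj ≤ pi then some (pi - pj) else loopJA prices pi rest

def finalPrices (prices : List Int) : List Int :=
  (PySem.List.pyRange 0 (prices.length : Int) 1).foldl (fun arr i =>
    let pi := PySem.List.pyGetD prices i 0
    match loopJA prices pi (PySem.List.pyRange (i + 1) (prices.length : Int) 1) with
    | some v => arr ++ [v]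
    | none => arr ++ [pi]) []

-- ===== PORT B =====
def finalPrices_alt (prices : List Int) : List Int :=
  let s := prices.reverse.foldl (fun (s : List Int × List Int) p =>
    let stack := s.2.dropWhile (fun x => decide (p < x))   -- while stack and stack[-1] > p: pop
    let d := stack.headD 0                                 -- stack[-1] if stack else 0
    (s.1 ++ [p - d], p :: stack)) ([], [])
  s.1.reverse

-- ===== PRECONDITION & SPEC =====
def Spec_finalPrices (prices : List Int) (out : List Int) : Prop := out = finalPrices_alt prices
instance (prices : List Int) (out : List Int) : Decidable (Spec_finalPrices prices out) := by unfold Spec_finalPrices; infer_instance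

-- ===== CLAIM (what is proved, stated in full; the proofs are below) =====
def Claim_equal_finalPrices : Prop := ∀ (prices : List Int), Dom_finalPrices prices → Spec_finalPrices prices (finalPrices prices)

-- ===== LEMMAS AND PROOFS =====

-- common specification: each price minus the first later price that is ≤ it (0 if none)
def specF : List Int → List Int
  | [] => []
  | p :: xs => (p - ((xs.find? (fun a => decide (a ≤ p))).getD 0)) :: specF xs

-- the stack contents after processing a suffix, abstractly
def stackF : List Int → List Int
  | [] => []
  | x :: xs => x :: (stackF xs).dropWhile (fun a => decide (x < a))

lemma find?_dropWhile_of_imp {α : Type} (q r : α → Bool) (l : List α)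
    (h : ∀ a, r a = true → q a = false) :
    (l.dropWhile r).find? q = l.find? q := by
  induction l with
  | nil => rfl
  | cons x xs ih =>
    by_cases hx : r x = true
    · rw [List.dropWhile_cons_of_pos hx, ih, List.find?_cons_of_neg (by simp [h x hx])]
    · rw [List.dropWhile_cons_of_neg (by simp [hx])]

lemma find?_stackF (p : Int) (xs : List Int) :
    (stackF xs).find? (fun a => decide (a ≤ p)) = xs.find? (fun a => decide (a ≤ p)) := by
  induction xs with
  | nil => rfl
  | cons x xs ih =>
    by_cases hx : x ≤ p
    · simp [stackF, List.find?_cons_of_pos, hx]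
    · rw [stackF, List.find?_cons_of_neg (by simpa using hx),
        List.find?_cons_of_neg (by simpa using hx),
        find?_dropWhile_of_imp _ _ _ (fun a ha => by
          simp only [decide_eq_true_eq] at ha
          simp only [decide_eq_false_iff_not, not_le]
          omega), ih]

lemma headD_dropWhile_lt (p : Int) (l : List Int) :
    (l.dropWhile (fun x => decide (p < x))).headD 0 =
      (l.find? (fun a => decide (a ≤ p))).getD 0 := by
  have h := List.find?_not_eq_head?_dropWhile (fun x => decide (p < x)) l
  have hp : (fun x : Int => !decide (p < x)) = (fun a : Int => decide (a ≤ p)) := by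
    funext a
    by_cases h : a ≤ p
    · simp [h, not_lt.2 h]
    · simp [h, not_le.1 h]
  rw [hp] at h
  rw [List.headD_eq_head?_getD, ← h]

-- B's fold, in foldr form, computes (specF in reverse, stackF)
lemma foldrB (xs : List Int) :
    xs.foldr (fun p (s : List Int × List Int) =>
      let stack := s.2.dropWhile (fun x => decide (p < x))
      let d := stack.headD 0
      (s.1 ++ [p - d], p :: stack)) ([], []) = ((specF xs).reverse, stackF xs) := by
  induction xs with
  | nil => rfl
  | cons x xs ih =>
    simp only [List.foldr_cons, ih, specF, stackF, List.reverse_cons]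
    rw [headD_dropWhile_lt, find?_stackF]

lemma alt_eq_specF (prices : List Int) : finalPrices_alt prices = specF prices := by
  unfold finalPrices_alt
  rw [List.foldl_reverse]
  simp only [foldrB, List.reverse_reverse]

-- A's inner loop is the first-match search on the dropped suffix
lemma loopJA_eq (prices : List Int) (pi : Int) :
    ∀ (m k : Nat), prices.length - k = m →
      loopJA prices pi (PySem.List.pyRange (k : Int) (prices.length : Int) 1) =
        ((prices.drop k).find? (fun a => decide (a ≤ pi))).map (fun d => pi - d) := by
  intro m
  induction m with
  | zero =>
    intro k hk
    rw [PySem.List.pyRange_one_eq_nil (by omega), List.drop_eq_nil_of_le (by omega)]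
    rfl
  | succ m ih =>
    intro k hk
    have hlt : k < prices.length := by omega
    rw [PySem.List.pyRange_one_cons (by exact_mod_cast hlt)]
    rw [List.drop_eq_getElem_cons hlt]
    simp only [loopJA, PySem.List.pyGetD_natCast, List.getD_eq_getElem?_getD,
      List.getElem?_eq_getElem hlt, Option.getD_some]
    by_cases hle : prices[k] ≤ pi
    · rw [if_pos hle, List.find?_cons_of_pos (by simpa using hle)]
      rfl
    · rw [if_neg hle, List.find?_cons_of_neg (by simpa using hle)]
      have : (k : Int) + 1 = ((k + 1 : Nat) : Int) := by push_cast; ring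
      rw [this, ih (k + 1) (by omega)]

-- A's outer loop from index k produces specF of the dropped suffix
lemma outerA (prices : List Int) :
    ∀ (m k : Nat), prices.length - k = m → ∀ (arr : List Int),
      (PySem.List.pyRange (k : Int) (prices.length : Int) 1).foldl (fun arr i =>
        let pi := PySem.List.pyGetD prices i 0
        match loopJA prices pi (PySem.List.pyRange (i + 1) (prices.length : Int) 1) with
        | some v => arr ++ [v]
        | none => arr ++ [pi]) arr = arr ++ specF (prices.drop k) := by
  intro m
  induction m with
  | zero =>
    intro k hk arr
    rw [PySem.List.pyRange_one_eq_nil (by omega), List.drop_eq_nil_of_le (by omega)]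
    simp [specF]
  | succ m ih =>
    intro k hk arr
    have hlt : k < prices.length := by omega
    rw [PySem.List.pyRange_one_cons (by exact_mod_cast hlt), List.foldl_cons]
    have hcast : (k : Int) + 1 = ((k + 1 : Nat) : Int) := by push_cast; ring
    simp only [PySem.List.pyGetD_natCast, hcast,
      loopJA_eq prices _ (prices.length - (k + 1)) (k + 1) rfl]
    rw [ih (k + 1) (by omega)]
    rw [List.drop_eq_getElem_cons hlt, specF]
    have hg : prices[k]?.getD 0 = prices[k] := by
      rw [List.getElem?_eq_getElem hlt]; rfl
    rcases hfind : (prices.drop (k + 1)).find? (fun a => decide (a ≤ prices[k])) with _ | d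
    · simp [hg, hfind]
    · simp [hg, hfind]

lemma a_eq_specF (prices : List Int) : finalPrices prices = specF prices := by
  unfold finalPrices
  have h := outerA prices prices.length 0 (by omega) []
  simpa using h

-- ===== VERDICT (by name: the statement is the Claim_ definition above) =====
theorem finalPrices_spec : Claim_equal_finalPrices := by
  intro prices _
  unfold Spec_finalPrices
  rw [a_eq_specF, alt_eq_specF]
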